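-- pv_equiv track=rewrite | github.com/MisD77/computationalMethods_pythonProjects | frequent_words_minimumSkew/minimum_skew.py | print_skew
-- ===== SOURCE A (Python) =====
-- def print_skew(dna_string):
--     diff = 0
--     diff_d_c_list = [diff]
--     g_count = 0
--     c_count = 0
--     for letter in dna_string:
--         if letter == 'G':
--             g_count += 1
--         elif letter == 'C':
--             c_count += 1
--         diff = g_count - c_count
--         diff_d_c_list.append(diff)
--
--     min_diff = min(diff_d_c_list)
--     index_list = []
--     for index in range(len(diff_d_c_list)):
--         if diff_d_c_list[index] == min_diff:
--             index_list.append(index)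
--
--     return diff_d_c_list, index_list
-- ===== SOURCE B (Python) =====
-- def print_skew(dna_string):
--     diff = 0
--     skew = [0]
--     min_diff = 0
--     index_list = [0]
--     i = 1
--     for letter in dna_string:
--         if letter == 'G':
--             diff += 1
--         elif letter == 'C':
--             diff -= 1
--         skew.append(diff)
--         if diff < min_diff:
--             min_diff = diff
--             index_list = [i]
--         elif diff == min_diff:
--             index_list.append(i)
--         i += 1
--     return skew, index_list
-- ===== Notes on version B (the rewrite author's own statement) =====
-- stated objective: alternative
-- what changed: B builds the skew array and tracks the running minimum and its index list in a single pass over the string, eliminating A's separate min() scan and its index-rescan loop over the skew list.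
import Mathlib
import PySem

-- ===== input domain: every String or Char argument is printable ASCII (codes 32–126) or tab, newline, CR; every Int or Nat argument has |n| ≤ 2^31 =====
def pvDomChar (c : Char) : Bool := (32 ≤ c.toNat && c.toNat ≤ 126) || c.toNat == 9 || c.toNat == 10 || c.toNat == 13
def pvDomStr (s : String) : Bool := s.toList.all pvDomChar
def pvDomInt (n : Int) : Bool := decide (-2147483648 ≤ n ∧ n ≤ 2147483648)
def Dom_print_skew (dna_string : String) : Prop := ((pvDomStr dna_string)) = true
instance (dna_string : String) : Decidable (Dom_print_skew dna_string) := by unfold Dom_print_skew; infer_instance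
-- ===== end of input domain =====

-- B builds the skew array and tracks the running minimum and its index list in one pass,
-- replacing A's separate min() scan and index-rescan loop (same O(n) cost, different decomposition).


-- ===== PORT A =====
def print_skew (dna_string : String) : List Int × List Int :=
  let st := dna_string.toList.foldl
    (fun (s : List Int × Int × Int) letter =>
      let g := if letter = 'G' then s.2.1 + 1 else s.2.1
      let c := if letter = 'G' then s.2.2 else if letter = 'C' then s.2.2 + 1 else s.2.2
      (s.1 ++ [g - c], g, c))
    ([0], 0, 0)
  let diff_d_c_list := st.1
  -- Python's min on a list; diff_d_c_list always starts with 0, so min never raises (getD unreachable)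
  let min_diff := (PySem.List.min? diff_d_c_list (fun x => x)).getD 0
  let index_list := (PySem.List.pyRange 0 (diff_d_c_list.length : Int) 1).foldl
    (fun acc index =>
      if PySem.List.pyGet? diff_d_c_list index = some min_diff then acc ++ [index] else acc)
    []
  (diff_d_c_list, index_list)

-- ===== PORT B =====
def print_skew_alt (dna_string : String) : List Int × List Int :=
  let st := dna_string.toList.foldl
    (fun (s : Int × List Int × Int × List Int × Int) letter =>
      let diff := if letter = 'G' then s.1 + 1 else if letter = 'C' then s.1 - 1 else s.1
      let skew := s.2.1 ++ [diff]
      if diff < s.2.2.1 then (diff, skew, diff, [s.2.2.2.2], s.2.2.2.2 + 1)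
      else if diff = s.2.2.1 then (diff, skew, s.2.2.1, s.2.2.2.1 ++ [s.2.2.2.2], s.2.2.2.2 + 1)
      else (diff, skew, s.2.2.1, s.2.2.2.1, s.2.2.2.2 + 1))
    (0, [0], 0, [0], 1)
  (st.2.1, st.2.2.2.1)

-- ===== PRECONDITION & SPEC =====
def Spec_print_skew (dna_string : String) (out : List Int × List Int) : Prop := out = print_skew_alt dna_string
instance (dna_string : String) (out : List Int × List Int) : Decidable (Spec_print_skew dna_string out) := by unfold Spec_print_skew; infer_instance

-- ===== CLAIM (what is proved, stated in full; the proofs are below) =====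
def Claim_equal_print_skew : Prop := ∀ (dna_string : String), Dom_print_skew dna_string → Spec_print_skew dna_string (print_skew dna_string)

-- ===== LEMMAS AND PROOFS =====

/-- one skew step: +1 for 'G', -1 for 'C'. -/
def pvStep (d : Int) (x : Char) : Int :=
  if x = 'G' then d + 1 else if x = 'C' then d - 1 else d

/-- the skew values appended while scanning `l` starting from running diff `d`. -/
def pvSkewFrom (d : Int) : List Char → List Int
  | [] => []
  | x :: xs => pvStep d x :: pvSkewFrom (pvStep d x) xs

/-- minimum of a non-empty list as a fold (0 for []). -/
def pvMn : List Int → Int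
  | [] => 0
  | h :: t => t.foldl min h

/-- indices (starting at `s`) whose element equals `m`. -/
def pvMinIdx (L : List Int) (m : Int) (s : Int) : List Int :=
  match L with
  | [] => []
  | x :: xs => if x = m then s :: pvMinIdx xs m (s + 1) else pvMinIdx xs m (s + 1)

theorem pvA_fold (l : List Char) : ∀ (lst : List Int) (g c : Int),
    (l.foldl (fun (s : List Int × Int × Int) letter =>
      let g := if letter = 'G' then s.2.1 + 1 else s.2.1
      let c := if letter = 'G' then s.2.2 else if letter = 'C' then s.2.2 + 1 else s.2.2
      (s.1 ++ [g - c], g, c)) (lst, g, c)).1 = lst ++ pvSkewFrom (g - c) l := by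
  induction l with
  | nil => intro lst g c; simp [pvSkewFrom]
  | cons x xs ih =>
    intro lst g c
    simp only [List.foldl_cons]
    rw [ih]
    have hstep : (if x = 'G' then g + 1 else g) -
        (if x = 'G' then c else if x = 'C' then c + 1 else c) = pvStep (g - c) x := by
      unfold pvStep; split_ifs <;> omega
    simp [hstep, pvSkewFrom]

theorem pvMn_le (L : List Int) (hL : L ≠ []) : ∀ x ∈ L, pvMn L ≤ x := by
  match L with
  | h :: t =>
    intro x hx
    have := PySem.List.foldl_min_le t h
    rcases List.mem_cons.mp hx with rfl | hx
    · exact this.1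
    · exact this.2 x hx

theorem pvMn_append (L : List Int) (_hL : L ≠ []) (v : Int) :
    pvMn (L ++ [v]) = min (pvMn L) v := by
  match L with
  | h :: t => simp [pvMn, List.foldl_append]

theorem pvMinIdx_append (L : List Int) (m s v : Int) :
    pvMinIdx (L ++ [v]) m s =
      pvMinIdx L m s ++ (if v = m then [s + (L.length : Int)] else []) := by
  induction L generalizing s with
  | nil => simp [pvMinIdx]
  | cons x xs ih =>
    simp only [List.cons_append, pvMinIdx, ih]
    split_ifs <;> simp <;> ring_nf
  
theorem pvMinIdx_nil_of_lt (L : List Int) (m : Int) (h : ∀ x ∈ L, m < x) :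
    ∀ s, pvMinIdx L m s = [] := by
  induction L with
  | nil => intro s; simp [pvMinIdx]
  | cons x xs ih =>
    intro s
    have hx := h x (by simp)
    simp only [pvMinIdx]
    rw [if_neg (by omega)]
    exact ih (fun y hy => h y (by simp [hy])) _

theorem pvB_fold (l : List Char) : ∀ (d : Int) (L : List Int) (hL : L ≠ []),
    (l.foldl (fun (s : Int × List Int × Int × List Int × Int) letter =>
      let diff := if letter = 'G' then s.1 + 1 else if letter = 'C' then s.1 - 1 else s.1
      let skew := s.2.1 ++ [diff]
      if diff < s.2.2.1 then (diff, skew, diff, [s.2.2.2.2], s.2.2.2.2 + 1)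
      else if diff = s.2.2.1 then (diff, skew, s.2.2.1, s.2.2.2.1 ++ [s.2.2.2.2], s.2.2.2.2 + 1)
      else (diff, skew, s.2.2.1, s.2.2.2.1, s.2.2.2.2 + 1))
      (d, L, pvMn L, pvMinIdx L (pvMn L) 0, (L.length : Int))) =
    (l.foldl pvStep d, L ++ pvSkewFrom d l,
      pvMn (L ++ pvSkewFrom d l),
      pvMinIdx (L ++ pvSkewFrom d l) (pvMn (L ++ pvSkewFrom d l)) 0,
      ((L ++ pvSkewFrom d l).length : Int)) := by
  induction l with
  | nil => intro d L hL; simp [pvSkewFrom]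
  | cons x xs ih =>
    intro d L hL
    simp only [List.foldl_cons]
    have hv : (if x = 'G' then d + 1 else if x = 'C' then d - 1 else d) = pvStep d x := rfl
    set v := pvStep d x with hvdef
    have key : (if v < pvMn L then (v, L ++ [v], v, ([(L.length : Int)] : List Int), (L.length : Int) + 1)
        else if v = pvMn L then (v, L ++ [v], pvMn L, pvMinIdx L (pvMn L) 0 ++ [(L.length : Int)], (L.length : Int) + 1)
        else (v, L ++ [v], pvMn L, pvMinIdx L (pvMn L) 0, (L.length : Int) + 1)) =
        (v, L ++ [v], pvMn (L ++ [v]), pvMinIdx (L ++ [v]) (pvMn (L ++ [v])) 0, ((L ++ [v]).length : Int)) := by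
      rw [pvMn_append L hL v, pvMinIdx_append]
      rcases lt_trichotomy v (pvMn L) with h1 | h1 | h1
      · have hmin : min (pvMn L) v = v := min_eq_right h1.le
        have hnil : pvMinIdx L v 0 = [] :=
          pvMinIdx_nil_of_lt L v (fun y hy => lt_of_lt_of_le h1 (pvMn_le L hL y hy)) 0
        rw [hmin, if_pos h1, if_pos rfl, hnil]
        simp
      · have hmin : min (pvMn L) v = pvMn L := by omega
        rw [hmin, if_neg (by omega), if_pos h1, if_pos h1]
        simp
      · have hmin : min (pvMn L) v = pvMn L := by omega
        rw [hmin, if_neg (by omega), if_neg (by omega), if_neg (by omega)]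
        simp
    simp only [hv]
    rw [key]
    have hrhs : L ++ pvSkewFrom d (x :: xs) = (L ++ [v]) ++ pvSkewFrom v xs := by
      simp [pvSkewFrom, hvdef]
    rw [hrhs]
    exact ih v (L ++ [v]) (by simp)
  
theorem pvMinIdx_eq_filter (L : List Int) (m : Int) : ∀ (s : Nat),
    pvMinIdx L m (s : Int) =
      ((List.range L.length).filter (fun k => L[k]? = some m)).map (fun k => ((s + k : Nat) : Int)) := by
  induction L with
  | nil => intro s; simp [pvMinIdx]
  | cons x xs ih =>
    intro s
    have hpred : ((fun k => decide ((x :: xs)[k]? = some m)) ∘ Nat.succ) =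
        (fun k => decide (xs[k]? = some m)) := by
      funext k; simp
    have hcast : (s : Int) + 1 = (((s + 1) : Nat) : Int) := by push_cast; ring
    simp only [pvMinIdx, List.length_cons, List.range_succ_eq_map, List.filter_cons,
      List.filter_map, hpred, List.getElem?_cons_zero, hcast, ih (s + 1)]
    by_cases hx : x = m
    · simp [hx]
      intro a _ _; ring
    · simp [hx]
      intro a _ _; ring

-- ===== VERDICT (by name: the statement is the Claim_ definition above) =====
theorem print_skew_spec : Claim_equal_print_skew := by
  intro dna _
  unfold Spec_print_skew print_skew print_skew_alt
  have hA := pvA_fold dna.toList [0] 0 0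
  rw [show (0 : Int) - 0 = 0 from rfl] at hA
  have hB := pvB_fold dna.toList 0 [0] (by simp)
  rw [show pvMn [0] = (0 : Int) from rfl,
      show pvMinIdx [0] 0 0 = [0] from by simp [pvMinIdx],
      show ((([0] : List Int)).length : Int) = 1 from by simp] at hB
  simp only [hA, hB]
  set L := ([0] : List Int) ++ pvSkewFrom 0 dna.toList with hLdef
  have hmin : (PySem.List.min? L (fun x => x)).getD 0 = pvMn L := by
    rw [show L = 0 :: pvSkewFrom 0 dna.toList from by simp [hLdef], PySem.List.min?_id_cons]
    simp [pvMn]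
  simp only [hmin]
  congr 1
  rw [PySem.List.pyRange_one]
  simp only [sub_zero, Int.toNat_natCast, List.foldl_map, zero_add]
  rw [PySem.List.foldl_append_ite
        (p := fun (k : Nat) => PySem.List.pyGet? L (k : Int) = some (pvMn L))
        (f := fun (k : Nat) => (k : Int))]
  have hfilter := pvMinIdx_eq_filter L (pvMn L) 0
  simp only [Nat.cast_zero, zero_add] at hfilter
  rw [hfilter]
  simp [PySem.List.pyGet?_natCast]
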